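-- pv_equiv track=rewrite | github.com/santhoshballa31/MyGymApp | practice.py | rotate_ntimes
-- ===== SOURCE A (Python) =====
-- from typing import List
--
-- def rotate_ntimes(nums: List[int], n):
--
--     while(n > 0):
--         replaced_item = nums[0]
--         for i in range(1, len(nums)):
--             nums[i-1] = nums[i]
--         n -=1
--         nums[len(nums)-1] = replaced_item
--
--
--     return nums, nums[0]
-- ===== SOURCE B (Python) =====
-- def rotate_ntimes(nums, n):
--     # Rotate left by n mod len in one slice step instead of n one-step shifts.
--     if n > 0:
--         k = n % len(nums)
--         nums[:] = nums[k:] + nums[:k]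
--     return nums, nums[0]
-- ===== Notes on version B (the rewrite author's own statement) =====
-- stated objective: faster
-- what changed: Replaces the n-fold one-position shift loop (n * len element moves) with a single slice rotation by n mod len.
import Mathlib
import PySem

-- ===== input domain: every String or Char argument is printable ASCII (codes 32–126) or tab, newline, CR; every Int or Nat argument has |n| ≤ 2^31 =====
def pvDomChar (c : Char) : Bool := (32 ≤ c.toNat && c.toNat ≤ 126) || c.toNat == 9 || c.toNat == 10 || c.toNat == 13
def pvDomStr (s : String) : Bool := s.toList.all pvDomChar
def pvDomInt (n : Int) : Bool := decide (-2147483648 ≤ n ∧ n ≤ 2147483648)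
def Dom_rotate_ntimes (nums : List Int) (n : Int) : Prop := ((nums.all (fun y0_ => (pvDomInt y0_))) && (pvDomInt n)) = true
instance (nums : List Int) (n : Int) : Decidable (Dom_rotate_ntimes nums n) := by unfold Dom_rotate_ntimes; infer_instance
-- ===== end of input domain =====

-- B rotates by one slice step (n mod len) instead of A's n single-position shift passes.
-- Both Pythons mutate nums in place (A element-wise, B via nums[:] = ...); the equivalence
-- proved here is about the return value.

-- ===== PORT A =====
-- inner for-loop: for i in range(1, len(nums)): nums[i-1] = nums[i]
def pvShift (nums : List Int) : List Int :=
  (PySem.List.pyRange 1 (nums.length : Int) 1).foldl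
    (fun acc i => acc.set (i - 1).toNat (PySem.List.pyGetD acc i 0)) nums

-- while(n > 0) body, iterated n.toNat times; pyGetD is exact under Pre_ (nums ≠ [])
def pvWhileA : Nat → List Int → List Int
  | 0, nums => nums
  | k + 1, nums =>
      let replaced := PySem.List.pyGetD nums 0 0
      let shifted := pvShift nums
      pvWhileA k (shifted.set (shifted.length - 1) replaced)

def rotate_ntimes (nums : List Int) (n : Int) : List Int × Int :=
  let res := pvWhileA n.toNat nums
  (res, PySem.List.pyGetD res 0 0)

-- ===== PORT B =====
def rotate_ntimes_alt (nums : List Int) (n : Int) : List Int × Int :=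
  let nums' :=
    if n > 0 then
      let k := PySem.Int.mod n (nums.length : Int)
      PySem.List.slice nums (some k) none ++ PySem.List.slice nums none (some k)
    else nums
  (nums', PySem.List.pyGetD nums' 0 0)

-- ===== PRECONDITION & SPEC =====
-- On the empty list both programs raise (A: IndexError at nums[0]; B: ZeroDivisionError for
-- n > 0, IndexError otherwise), so [] is excluded; no other input is excluded.
def Pre_rotate_ntimes (nums : List Int) (n : Int) : Prop := nums ≠ []
instance (nums : List Int) (n : Int) : Decidable (Pre_rotate_ntimes nums n) := by
  unfold Pre_rotate_ntimes; infer_instance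
def pvWitness_rotate_ntimes : List Int × Int := ([1, 2, 3], 2)

def Spec_rotate_ntimes (nums : List Int) (n : Int) (out : List Int × Int) : Prop := out = rotate_ntimes_alt nums n
instance (nums : List Int) (n : Int) (out : List Int × Int) : Decidable (Spec_rotate_ntimes nums n out) := by unfold Spec_rotate_ntimes; infer_instance

-- ===== CLAIM (what is proved, stated in full; the proofs are below) =====
def Claim_equal_rotate_ntimes : Prop := ∀ (nums : List Int) (n : Int), Dom_rotate_ntimes nums n → Pre_rotate_ntimes nums n → Spec_rotate_ntimes nums n (rotate_ntimes nums n)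

-- ===== LEMMAS AND PROOFS =====

-- invariant of A's inner shift loop: after range(1, m+1) the first m slots hold nums[1..m]
lemma pvShift_inv (l : List Int) (m : Nat) (hm : m + 1 ≤ l.length) :
    (PySem.List.pyRange 1 ((m : Int) + 1) 1).foldl
      (fun acc i => acc.set (i - 1).toNat (PySem.List.pyGetD acc i 0)) l
      = (l.drop 1).take m ++ l.drop m := by
  induction m with
  | zero => simp [PySem.List.pyRange_one_eq_nil]
  | succ m ih =>
      have hm' : m + 1 ≤ l.length := by omega
      rw [show ((m + 1 : Nat) : Int) + 1 = ((m : Int) + 1) + 1 by push_cast; ring,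
          PySem.List.pyRange_one_succ_right (by omega : (1:Int) ≤ (m : Int) + 1),
          List.foldl_append, ih hm']
      simp only [List.foldl_cons, List.foldl_nil]
      have hidx : ((m : Int) + 1 - 1).toNat = m := by omega
      have htk : ((l.drop 1).take m).length = m := by
        simp [List.length_take]; omega
      have hget : PySem.List.pyGetD ((l.drop 1).take m ++ l.drop m) ((m : Int) + 1) 0
          = l[m + 1]'(by omega) := by
        rw [show (m : Int) + 1 = ((m + 1 : Nat) : Int) by push_cast; ring,
            PySem.List.pyGetD_natCast, List.getD,
            List.getElem?_append_right (by omega), htk,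
            show m + 1 - m = 1 by omega]
        have h1 : (l.drop m)[1]? = some (l[m + 1]'(by omega)) := by
          rw [List.getElem?_drop]
          exact List.getElem?_eq_getElem (by omega)
        rw [h1, Option.getD_some]
      rw [hidx, hget, List.set_append, if_neg (by omega), htk, Nat.sub_self]
      have hd : l.drop m = l[m]'(by omega) :: l.drop (m + 1) :=
        List.drop_eq_getElem_cons (by omega)
      rw [hd, List.set_cons_zero, List.take_add_one]
      have h2 : (l.drop 1)[m]? = some (l[m + 1]'(by omega)) := by
        rw [List.getElem?_drop, Nat.add_comm]
        exact List.getElem?_eq_getElem (by omega)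
      rw [h2]
      simp

-- one iteration of A's while body is a left rotation by one
lemma pvStep_eq_rotate (l : List Int) (hl : l ≠ []) :
    (pvShift l).set ((pvShift l).length - 1) (PySem.List.pyGetD l 0 0) = l.rotate 1 := by
  have hlen : 1 ≤ l.length := List.length_pos_of_ne_nil hl
  have hsh : pvShift l = l.drop 1 ++ [l.getLast hl] := by
    unfold pvShift
    rw [show (l.length : Int) = ((l.length - 1 : Nat) : Int) + 1 by omega,
        pvShift_inv l (l.length - 1) (by omega)]
    rw [List.take_of_length_le (le_of_eq (by simp)), List.drop_length_sub_one hl]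
  rw [hsh]
  have hll : (l.drop 1 ++ [l.getLast hl]).length - 1 = (l.drop 1).length := by simp
  rw [hll, List.set_append, if_neg (lt_irrefl _), Nat.sub_self, List.set_cons_zero,
      List.rotate_eq_drop_append_take hlen]
  congr 1
  rw [PySem.List.pyGetD_zero]
  cases l with
  | nil => exact absurd rfl hl
  | cons x xs => simp [List.getD]

lemma pvWhileA_eq_rotate (k : Nat) (l : List Int) (hl : l ≠ []) :
    pvWhileA k l = l.rotate k := by
  induction k generalizing l with
  | zero => simp [pvWhileA]
  | succ k ih =>
      have h1 : l.rotate 1 ≠ [] := by simp [List.rotate_eq_nil_iff, hl]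
      simp only [pvWhileA]
      rw [pvStep_eq_rotate l hl, ih _ h1, List.rotate_rotate, Nat.add_comm]

-- ===== VERDICT (by name: the statement is the Claim_ definition above) =====
theorem rotate_ntimes_spec : Claim_equal_rotate_ntimes := by
  intro nums n _ hpre
  unfold Spec_rotate_ntimes rotate_ntimes rotate_ntimes_alt
  have hlen : 0 < nums.length := List.length_pos_of_ne_nil hpre
  by_cases hn : n > 0
  · rw [if_pos hn]
    have hlen' : (0:Int) < (nums.length : Int) := by exact_mod_cast hlen
    set k := PySem.Int.mod n (nums.length : Int) with hk
    have hk0 : 0 ≤ k := PySem.Int.mod_nonneg n hlen'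
    have hklt : k < (nums.length : Int) := PySem.Int.mod_lt n hlen'
    clear_value k
    have hcast : k = ((k.toNat : Nat) : Int) := (Int.toNat_of_nonneg hk0).symm
    have hslice : PySem.List.slice nums (some k) none ++ PySem.List.slice nums none (some k)
        = nums.rotate k.toNat := by
      rw [hcast, PySem.List.slice_from_natCast, PySem.List.slice_to_natCast,
          ← List.rotate_eq_drop_append_take (by omega)]
      congr 1
    have hkdef : k = n % (nums.length : Int) := by
      rw [hk, PySem.Int.mod_eq_emod_of_pos hlen']
    have hA : pvWhileA n.toNat nums = nums.rotate k.toNat := by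
      rw [pvWhileA_eq_rotate _ _ hpre]
      have h2 : ((n.toNat % nums.length : Nat) : Int) = n % (nums.length : Int) := by
        push_cast
        rw [Int.toNat_of_nonneg (by omega)]
      have : k.toNat = n.toNat % nums.length := by omega
      rw [this, List.rotate_mod]
    rw [hA, hslice]
  · rw [if_neg hn]
    have h0 : n.toNat = 0 := by omega
    rw [h0]
    rfl
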